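-- pv_equiv track=rewrite | github.com/Tulpana/ARC-AGI-2 | arc_agi_2_submission/ril/diagonal_patterns.py | move_along_diagonal
-- ===== SOURCE A (Python) =====
-- from typing import Dict, List, Optional, Tuple
--
-- Grid = List[List[int]]
--
-- def move_along_diagonal(grid: Grid, steps: int, direction: str = 'main-down') -> Grid:
--     """
--     Shift components along diagonal direction.
--     Direction: 'main-down', 'main-up', 'anti-down', 'anti-up'
--     """
--     if not grid or not grid[0]:
--         return grid
--
--     h, w = len(grid), len(grid[0])
--     result = [[0] * w for _ in range(h)]
--
--     # Determine shift direction
--     if direction == 'main-down':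
--         dr, dc = steps, steps  # Move down-right
--     elif direction == 'main-up':
--         dr, dc = -steps, -steps  # Move up-left
--     elif direction == 'anti-down':
--         dr, dc = steps, -steps  # Move down-left
--     elif direction == 'anti-up':
--         dr, dc = -steps, steps  # Move up-right
--     else:
--         return grid
--
--     # Move non-background pixels
--     for r in range(h):
--         for c in range(w):
--             if grid[r][c] != 0:
--                 nr, nc = r + dr, c + dc
--                 if 0 <= nr < h and 0 <= nc < w:
--                     result[nr][nc] = grid[r][c]
--
--     return result
-- ===== SOURCE B (Python) =====
-- def move_along_diagonal(grid, steps, direction='main-down'):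
--     """Block-copy re-implementation: translate the whole clipped rectangle with
--     row slices instead of scanning every cell (zeros copy harmlessly onto zeros)."""
--     if not grid or not grid[0]:
--         return grid
--     h, w = len(grid), len(grid[0])
--     deltas = {'main-down': (steps, steps), 'main-up': (-steps, -steps),
--               'anti-down': (steps, -steps), 'anti-up': (-steps, steps)}
--     if direction not in deltas:
--         return grid
--     dr, dc = deltas[direction]
--     result = [[0] * w for _ in range(h)]
--     r0, r1 = max(0, -dr), min(h, h - dr)
--     c0, c1 = max(0, -dc), min(w, w - dc)
--     if c0 < c1:
--         for r in range(r0, r1):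
--             result[r + dr][c0 + dc:c1 + dc] = grid[r][c0:c1]
--     return result
-- ===== Notes on version B (the rewrite author's own statement) =====
-- stated objective: alternative
-- what changed: Instead of scanning every cell and scattering each nonzero pixel through a bounds test, B computes the clipped source rectangle [r0,r1)x[c0,c1) by range arithmetic and block-copies each row slice into the zero-initialized result (zeros copy harmlessly onto zeros), with the direction table as a dict.
import Mathlib
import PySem

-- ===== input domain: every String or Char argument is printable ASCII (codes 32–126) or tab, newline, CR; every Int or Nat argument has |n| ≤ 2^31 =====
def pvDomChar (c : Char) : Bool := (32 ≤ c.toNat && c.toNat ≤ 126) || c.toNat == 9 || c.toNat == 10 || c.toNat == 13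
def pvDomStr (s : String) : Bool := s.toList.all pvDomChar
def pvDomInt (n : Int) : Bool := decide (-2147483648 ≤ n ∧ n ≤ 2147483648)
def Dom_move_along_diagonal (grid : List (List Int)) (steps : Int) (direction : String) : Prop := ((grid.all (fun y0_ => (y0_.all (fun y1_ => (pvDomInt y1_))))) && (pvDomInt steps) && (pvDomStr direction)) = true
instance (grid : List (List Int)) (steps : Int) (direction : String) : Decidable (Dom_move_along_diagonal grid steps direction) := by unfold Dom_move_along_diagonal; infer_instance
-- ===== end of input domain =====

-- B block-copies the clipped source rectangle row-by-row with slices instead of scattering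
-- each nonzero cell through a bounds test (alternative algorithm: range arithmetic + block copy).


-- ===== PORT A =====
-- result[i][j] = v  (writing into a nested list; no-op when an index is out of range, as guarded in A)
def pvSet2 (g : List (List Int)) (i j : Nat) (v : Int) : List (List Int) :=
  g.set i ((g.getD i []).set j v)

-- the body of A's inner 'for c in range(w)' loop
def pvAInner (grid : List (List Int)) (h w : Nat) (dr dc : Int) (r : Nat)
    (res : List (List Int)) (c : Nat) : List (List Int) :=
  if (grid.getD r []).getD c 0 ≠ 0 then
    if 0 ≤ (r : Int) + dr ∧ (r : Int) + dr < (h : Int) ∧ 0 ≤ (c : Int) + dc ∧ (c : Int) + dc < (w : Int) then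
      pvSet2 res ((r : Int) + dr).toNat ((c : Int) + dc).toNat ((grid.getD r []).getD c 0)
    else res
  else res

-- A's outer 'for r in range(h)' loop body
def pvAOuter (grid : List (List Int)) (h w : Nat) (dr dc : Int)
    (res : List (List Int)) (r : Nat) : List (List Int) :=
  (List.range w).foldl (pvAInner grid h w dr dc r) res

def move_along_diagonal (grid : List (List Int)) (steps : Int) (direction : String) : List (List Int) :=
  match grid with
  | [] => grid
  | row0 :: _ =>
    if row0.length = 0 then grid
    else
      let h := grid.length
      let w := row0.length
      let dd : Option (Int × Int) :=
        if direction = "main-down" then some (steps, steps)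
        else if direction = "main-up" then some (-steps, -steps)
        else if direction = "anti-down" then some (steps, -steps)
        else if direction = "anti-up" then some (-steps, steps)
        else none
      match dd with
      | none => grid
      | some (dr, dc) =>
        (List.range h).foldl (pvAOuter grid h w dr dc)
          (List.replicate h (List.replicate w (0 : Int)))

-- ===== PORT B =====
-- 'result[r+dr][c0+dc:c1+dc] = grid[r][c0:c1]' performed on a fresh all-zero row
def pvRowB (row : List Int) (w c0 c1 dc : Int) : List Int :=
  List.replicate (c0 + dc).toNat 0 ++ PySem.List.slice row (some c0) (some c1)
    ++ List.replicate (w - (c1 + dc)).toNat 0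

-- the body of B's 'for r in range(r0, r1)' loop
def pvBStep (grid : List (List Int)) (w c0 c1 dr dc : Int)
    (res : List (List Int)) (r : Int) : List (List Int) :=
  res.set (r + dr).toNat (pvRowB (grid.getD r.toNat []) w c0 c1 dc)

def move_along_diagonal_alt (grid : List (List Int)) (steps : Int) (direction : String) : List (List Int) :=
  match grid with
  | [] => grid
  | row0 :: _ =>
    if row0.length = 0 then grid
    else
      let h : Int := grid.length
      let w : Int := row0.length
      let deltas : PySem.Dict String (Int × Int) :=
        PySem.Dict.ofList [("main-down", (steps, steps)), ("main-up", (-steps, -steps)),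
                           ("anti-down", (steps, -steps)), ("anti-up", (-steps, steps))]
      match deltas.get? direction with
      | none => grid
      | some (dr, dc) =>
        let result := List.replicate h.toNat (List.replicate w.toNat (0 : Int))
        let r0 := max 0 (-dr)
        let r1 := min h (h - dr)
        let c0 := max 0 (-dc)
        let c1 := min w (w - dc)
        if c0 < c1 then
          (PySem.List.pyRange r0 r1 1).foldl (pvBStep grid w c0 c1 dr dc) result
        else result

-- ===== PRECONDITION & SPEC =====
-- Pre_ excludes exactly the inputs where A raises IndexError: a recognised direction together
-- with some row shorter than the first row (A indexes grid[r][c] for every c < len(grid[0])).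
def Pre_move_along_diagonal (grid : List (List Int)) (steps : Int) (direction : String) : Prop :=
  (direction = "main-down" ∨ direction = "main-up" ∨ direction = "anti-down" ∨ direction = "anti-up") →
    ∀ row ∈ grid, (grid.headD []).length ≤ row.length
instance (grid : List (List Int)) (steps : Int) (direction : String) : Decidable (Pre_move_along_diagonal grid steps direction) := by unfold Pre_move_along_diagonal; infer_instance

def pvWitness_move_along_diagonal : List (List Int) × Int × String :=
  ([[1, 0], [0, 2]], 1, "main-down")

def Spec_move_along_diagonal (grid : List (List Int)) (steps : Int) (direction : String) (out : List (List Int)) : Prop := out = move_along_diagonal_alt grid steps direction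
instance (grid : List (List Int)) (steps : Int) (direction : String) (out : List (List Int)) : Decidable (Spec_move_along_diagonal grid steps direction out) := by unfold Spec_move_along_diagonal; infer_instance

-- ===== CLAIM (what is proved, stated in full; the proofs are below) =====
def Claim_equal_move_along_diagonal : Prop := ∀ (grid : List (List Int)) (steps : Int) (direction : String), Dom_move_along_diagonal grid steps direction → Pre_move_along_diagonal grid steps direction → Spec_move_along_diagonal grid steps direction (move_along_diagonal grid steps direction)

-- ===== LEMMAS AND PROOFS =====

def pvGetCell (g : List (List Int)) (i j : Nat) : Int := (g.getD i []).getD j 0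

def pvShape (h w : Nat) (g : List (List Int)) : Prop :=
  g.length = h ∧ ∀ row ∈ g, row.length = w

-- the common closed form both loops produce: the translated grid, out-of-range sources give 0
def pvF (grid : List (List Int)) (h w : Nat) (dr dc : Int) (i j : Nat) : Int :=
  if 0 ≤ (i : Int) - dr ∧ (i : Int) - dr < (h : Int) ∧ 0 ≤ (j : Int) - dc ∧ (j : Int) - dc < (w : Int)
  then pvGetCell grid ((i : Int) - dr).toNat ((j : Int) - dc).toNat else 0

def pvTarget (grid : List (List Int)) (h w : Nat) (dr dc : Int) : List (List Int) :=
  (List.range h).map (fun i => (List.range w).map (fun j => pvF grid h w dr dc i j))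

theorem pv_foldl_preserve {α β : Type} (P : α → Prop) (f : α → β → α) (l : List β) (init : α)
    (hstep : ∀ a b, b ∈ l → P a → P (f a b)) (h0 : P init) : P (l.foldl f init) := by
  induction l generalizing init with
  | nil => exact h0
  | cons b bs ih =>
    exact ih _ (fun a x hx ha => hstep a x (List.mem_cons_of_mem _ hx) ha)
      (hstep _ _ (List.mem_cons_self) h0)

theorem pv_getD_set_char {α : Type} (l : List α) (n i : Nat) (a : α) (d : α) :
    (l.set n a).getD i d = if n = i ∧ i < l.length then a else l.getD i d := by
  simp only [List.getD_eq_getElem?_getD, List.getElem?_set]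
  by_cases h1 : n = i
  · subst h1; by_cases h2 : n < l.length <;> simp [h2]
  · simp [h1]

theorem pv_getD_append {α : Type} (l m : List α) (j : Nat) (d : α) :
    (l ++ m).getD j d = if j < l.length then l.getD j d else m.getD (j - l.length) d := by
  simp only [List.getD_eq_getElem?_getD, List.getElem?_append]
  split <;> rfl

theorem pvShape_replicate (h w : Nat) :
    pvShape h w (List.replicate h (List.replicate w (0 : Int))) := by
  refine ⟨List.length_replicate, fun row hrow => ?_⟩
  rw [List.eq_of_mem_replicate hrow, List.length_replicate]

theorem pvGetCell_replicate (h w i j : Nat) :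
    pvGetCell (List.replicate h (List.replicate w (0 : Int))) i j = 0 := by
  unfold pvGetCell
  simp [List.getD_eq_getElem?_getD, List.getElem?_replicate]
  split <;> simp

theorem pvRow_len {h w : Nat} {g : List (List Int)} (hg : pvShape h w g) {i : Nat} (hi : i < h) :
    (g.getD i []).length = w := by
  obtain ⟨hlen, hrows⟩ := hg
  have hi' : i < g.length := by omega
  rw [List.getD_eq_getElem _ _ hi']
  exact hrows _ (List.getElem_mem hi')

theorem pvShape_set2 {h w : Nat} {g : List (List Int)} (hg : pvShape h w g)
    (i j : Nat) (v : Int) (hi : i < h) : pvShape h w (pvSet2 g i j v) := by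
  refine ⟨by simp [pvSet2, hg.1], fun row hrow => ?_⟩
  rcases List.mem_or_eq_of_mem_set hrow with hmem | heq
  · exact hg.2 row hmem
  · subst heq
    rw [List.length_set]
    exact pvRow_len hg hi

theorem pvGetCell_set2 {h w : Nat} {g : List (List Int)} (hg : pvShape h w g)
    {i j i' j' : Nat} (v : Int) (hi : i < h) (hj : j < w) (hi' : i' < h) (hj' : j' < w) :
    pvGetCell (pvSet2 g i j v) i' j' = if i = i' ∧ j = j' then v else pvGetCell g i' j' := by
  unfold pvGetCell pvSet2
  rw [pv_getD_set_char]
  by_cases hii : i = i'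
  · subst hii
    rw [if_pos ⟨rfl, by rw [hg.1]; omega⟩, pv_getD_set_char]
    have hwlen : j' < (g.getD i []).length := by rw [pvRow_len hg hi]; omega
    by_cases hjj : j = j'
    · subst hjj; rw [if_pos ⟨rfl, hwlen⟩, if_pos ⟨rfl, rfl⟩]
    · rw [if_neg (by tauto), if_neg (by tauto)]
  · rw [if_neg (by tauto), if_neg (by tauto)]

theorem pvGetCell_setRow {g : List (List Int)} {i : Nat} (row : List Int) (i' j : Nat) :
    pvGetCell (g.set i row) i' j =
      if i = i' ∧ i' < g.length then row.getD j 0 else pvGetCell g i' j := by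
  unfold pvGetCell
  rw [pv_getD_set_char]
  split <;> rfl

theorem pvShape_AInner {grid : List (List Int)} {h w : Nat} {dr dc : Int} {r : Nat}
    {res : List (List Int)} (hres : pvShape h w res) (c : Nat) :
    pvShape h w (pvAInner grid h w dr dc r res c) := by
  unfold pvAInner
  split
  · split
    · rename_i hg
      exact pvShape_set2 hres _ _ _ (by omega)  -- guard gives 0 ≤ r+dr < h
    · exact hres
  · exact hres

theorem pvAInner_char (grid : List (List Int)) (h w : Nat) (dr dc : Int) (r : Nat)
    (i j : Nat) (hi : i < h) (hj : j < w) :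
    ∀ (cs : List Nat) (res : List (List Int)), pvShape h w res →
      pvGetCell (cs.foldl (pvAInner grid h w dr dc r) res) i j =
        if (i : Int) = (r : Int) + dr ∧ (∃ c ∈ cs, (c : Int) = (j : Int) - dc) ∧
            pvGetCell grid r ((j : Int) - dc).toNat ≠ 0
        then pvGetCell grid r ((j : Int) - dc).toNat
        else pvGetCell res i j := by
  intro cs
  induction cs with
  | nil => intro res _; simp
  | cons c cs ih =>
    intro res hres
    rw [List.foldl_cons, ih _ (pvShape_AInner hres c)]
    by_cases hC : (i : Int) = (r : Int) + dr ∧ (∃ c' ∈ cs, (c' : Int) = (j : Int) - dc) ∧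
        pvGetCell grid r ((j : Int) - dc).toNat ≠ 0
    · rw [if_pos hC]
      obtain ⟨h1, ⟨c', hc', hc'eq⟩, h3⟩ := hC
      rw [if_pos ⟨h1, ⟨c', List.mem_cons_of_mem _ hc', hc'eq⟩, h3⟩]
    · rw [if_neg hC]
      unfold pvAInner
      by_cases hv : (grid.getD r []).getD c 0 ≠ 0
      · rw [if_pos hv]
        by_cases hg : 0 ≤ (r : Int) + dr ∧ (r : Int) + dr < (h : Int) ∧
            0 ≤ (c : Int) + dc ∧ (c : Int) + dc < (w : Int)
        · rw [if_pos hg]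
          rw [pvGetCell_set2 hres _ (by omega) (by omega) hi hj]
          by_cases hit : ((r : Int) + dr).toNat = i ∧ ((c : Int) + dc).toNat = j
          · have hcj : ((j : Int) - dc).toNat = c := by omega
            rw [if_pos hit, if_pos ⟨by omega, ⟨c, List.mem_cons_self, by omega⟩,
              by rw [hcj]; exact hv⟩, hcj]
            rfl
          · rw [if_neg hit, if_neg (by
              rintro ⟨h1, ⟨c'', hmem, hceq⟩, h3⟩
              rcases List.mem_cons.mp hmem with rfl | hmem'
              · exact hit ⟨by omega, by omega⟩
              · exact hC ⟨h1, ⟨c'', hmem', hceq⟩, h3⟩)]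
        · rw [if_neg hg, if_neg (by
            rintro ⟨h1, ⟨c'', hmem, hceq⟩, h3⟩
            rcases List.mem_cons.mp hmem with rfl | hmem'
            · exact hg ⟨by omega, by omega, by omega, by omega⟩
            · exact hC ⟨h1, ⟨c'', hmem', hceq⟩, h3⟩)]
      · rw [if_neg hv, if_neg (by
          rintro ⟨h1, ⟨c'', hmem, hceq⟩, h3⟩
          rcases List.mem_cons.mp hmem with rfl | hmem'
          · have hcj : ((j : Int) - dc).toNat = c'' := by omega
            rw [hcj] at h3
            exact hv h3
          · exact hC ⟨h1, ⟨c'', hmem', hceq⟩, h3⟩)]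

theorem pvAOuter_char (grid : List (List Int)) (h w : Nat) (dr dc : Int)
    (i j : Nat) (hi : i < h) (hj : j < w) :
    ∀ (rs : List Nat) (res : List (List Int)), pvShape h w res →
      pvGetCell (rs.foldl (pvAOuter grid h w dr dc) res) i j =
        if (∃ r ∈ rs, (r : Int) = (i : Int) - dr) ∧
            (0 ≤ (j : Int) - dc ∧ (j : Int) - dc < (w : Int)) ∧
            pvGetCell grid ((i : Int) - dr).toNat ((j : Int) - dc).toNat ≠ 0
        then pvGetCell grid ((i : Int) - dr).toNat ((j : Int) - dc).toNat
        else pvGetCell res i j := by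
  intro rs
  induction rs with
  | nil => intro res _; simp
  | cons r rs ih =>
    intro res hres
    have hres' : pvShape h w (pvAOuter grid h w dr dc res r) := by
      unfold pvAOuter
      exact pv_foldl_preserve _ _ _ _ (fun a c _ ha => pvShape_AInner ha c) hres
    rw [List.foldl_cons, ih _ hres']
    by_cases hC : (∃ r' ∈ rs, (r' : Int) = (i : Int) - dr) ∧
        (0 ≤ (j : Int) - dc ∧ (j : Int) - dc < (w : Int)) ∧
        pvGetCell grid ((i : Int) - dr).toNat ((j : Int) - dc).toNat ≠ 0
    · rw [if_pos hC]
      obtain ⟨⟨r', hr', he⟩, h2, h3⟩ := hC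
      rw [if_pos ⟨⟨r', List.mem_cons_of_mem _ hr', he⟩, h2, h3⟩]
    · rw [if_neg hC]
      unfold pvAOuter
      rw [pvAInner_char grid h w dr dc r i j hi hj _ res hres]
      by_cases hr : (i : Int) = (r : Int) + dr ∧
          (∃ c ∈ List.range w, (c : Int) = (j : Int) - dc) ∧
          pvGetCell grid r ((j : Int) - dc).toNat ≠ 0
      · rw [if_pos hr]
        obtain ⟨h1, ⟨c, hc, hceq⟩, h3⟩ := hr
        have hcw := List.mem_range.mp hc
        have hri : ((i : Int) - dr).toNat = r := by omega
        rw [if_pos ⟨⟨r, List.mem_cons_self, by omega⟩, ⟨by omega, by omega⟩,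
          by rw [hri]; exact h3⟩, hri]
      · rw [if_neg hr, if_neg (by
          rintro ⟨⟨r', hmem, he⟩, h2, h3⟩
          rcases List.mem_cons.mp hmem with rfl | hmem'
          · have hri : ((i : Int) - dr).toNat = r' := by omega
            exact hr ⟨by omega, ⟨((j : Int) - dc).toNat,
              List.mem_range.mpr (by omega), by omega⟩, by rw [hri] at h3; exact h3⟩
          · exact hC ⟨⟨r', hmem', he⟩, h2, h3⟩)]

theorem pv_eq_target {grid g : List (List Int)} {h w : Nat} {dr dc : Int}
    (hsh : pvShape h w g)
    (hcell : ∀ i j, i < h → j < w → pvGetCell g i j = pvF grid h w dr dc i j) :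
    g = pvTarget grid h w dr dc := by
  apply List.ext_getElem
  · simp [pvTarget, hsh.1]
  · intro i hi1 hi2
    have hih : i < h := by rw [hsh.1] at hi1; exact hi1
    simp only [pvTarget, List.getElem_map, List.getElem_range]
    apply List.ext_getElem
    · rw [hsh.2 _ (List.getElem_mem hi1)]; simp
    · intro j hj1 hj2
      have hjw : j < w := by rw [hsh.2 _ (List.getElem_mem hi1)] at hj1; exact hj1
      simp only [List.getElem_map, List.getElem_range]
      have hc := hcell i j hih hjw
      unfold pvGetCell at hc
      rw [List.getD_eq_getElem _ _ hi1, List.getD_eq_getElem _ _ hj1] at hc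
      exact hc

theorem pvA_loop_eq_target (grid : List (List Int)) (h w : Nat) (dr dc : Int) :
    (List.range h).foldl (pvAOuter grid h w dr dc)
        (List.replicate h (List.replicate w (0 : Int))) = pvTarget grid h w dr dc := by
  have hsh := pvShape_replicate h w
  apply pv_eq_target
  · exact pv_foldl_preserve _ _ _ _
      (fun a r _ ha => pv_foldl_preserve _ _ _ _ (fun a' c _ ha' => pvShape_AInner ha' c) ha) hsh
  · intro i j hi hj
    rw [pvAOuter_char grid h w dr dc i j hi hj (List.range h) _ hsh, pvGetCell_replicate]
    unfold pvF
    by_cases hB : 0 ≤ (i : Int) - dr ∧ (i : Int) - dr < (h : Int) ∧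
        0 ≤ (j : Int) - dc ∧ (j : Int) - dc < (w : Int)
    · rw [if_pos hB]
      by_cases hv : pvGetCell grid ((i : Int) - dr).toNat ((j : Int) - dc).toNat = 0
      · rw [if_neg (by rintro ⟨_, _, h3⟩; exact h3 hv), hv]
      · rw [if_pos ⟨⟨((i : Int) - dr).toNat, List.mem_range.mpr (by omega), by omega⟩,
          ⟨by omega, by omega⟩, hv⟩]
    · rw [if_neg hB, if_neg (by
        rintro ⟨⟨r, hr, he⟩, ⟨h2a, h2b⟩, h3⟩
        have := List.mem_range.mp hr
        exact hB ⟨by omega, by omega, h2a, h2b⟩)]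

theorem pvRowB_len (row : List Int) (w c0 c1 dc : Int)
    (h0 : 0 ≤ c0) (h01 : c0 ≤ c1) (hcd : 0 ≤ c0 + dc) (hcw : c1 + dc ≤ w)
    (hrow : c1 ≤ (row.length : Int)) :
    (pvRowB row w c0 c1 dc).length = w.toNat := by
  unfold pvRowB
  rw [PySem.List.slice_toNat _ h0 (by omega)]
  simp only [List.length_append, List.length_replicate, List.length_take, List.length_drop]
  omega

theorem pvRowB_getD (row : List Int) (w c0 c1 dc : Int) (j : Nat)
    (h0 : 0 ≤ c0) (h01 : c0 ≤ c1) (hcd : 0 ≤ c0 + dc) (hcw : c1 + dc ≤ w)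
    (hrow : c1 ≤ (row.length : Int)) (hj : (j : Int) < w) :
    (pvRowB row w c0 c1 dc).getD j 0 =
      if c0 + dc ≤ (j : Int) ∧ (j : Int) < c1 + dc
      then row.getD ((j : Int) - dc).toNat 0 else 0 := by
  unfold pvRowB
  rw [PySem.List.slice_toNat _ h0 (by omega), pv_getD_append, pv_getD_append]
  simp only [List.length_append, List.length_replicate, List.length_take, List.length_drop]
  by_cases ha : j < (c0 + dc).toNat
  · rw [if_pos (by omega), if_pos ha, if_neg (by omega)]
    simp [List.getD_eq_getElem?_getD, List.getElem?_replicate]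
    split <;> rfl
  · by_cases hb : (j : Int) < c1 + dc
    · rw [if_pos (by omega), if_neg ha, if_pos ⟨by omega, hb⟩]
      have hmid : ((row.drop c0.toNat).take (c1.toNat - c0.toNat)).getD (j - (c0 + dc).toNat) 0
          = row.getD (c0.toNat + (j - (c0 + dc).toNat)) 0 := by
        simp only [List.getD_eq_getElem?_getD, List.getElem?_take, List.getElem?_drop]
        rw [if_pos (by omega)]
      rw [hmid]
      have : c0.toNat + (j - (c0 + dc).toNat) = ((j : Int) - dc).toNat := by omega
      rw [this]
    · rw [if_neg (by omega), if_neg (by omega)]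
      simp [List.getD_eq_getElem?_getD, List.getElem?_replicate]
      split <;> rfl

theorem pvBfold_char (grid : List (List Int)) (h : Nat) (w c0 c1 dr dc : Int)
    (i j : Nat) (hi : i < h) :
    ∀ (rs : List Int) (res : List (List Int)),
      (∀ r ∈ rs, 0 ≤ r ∧ 0 ≤ r + dr ∧ r + dr < (h : Int)) → res.length = h →
      pvGetCell (rs.foldl (pvBStep grid w c0 c1 dr dc) res) i j =
        if ((i : Int) - dr) ∈ rs
        then (pvRowB (grid.getD ((i : Int) - dr).toNat []) w c0 c1 dc).getD j 0
        else pvGetCell res i j := by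
  intro rs
  induction rs with
  | nil => intro res _ _; simp
  | cons r rs ih =>
    intro res hmem hlen
    have hlen' : (pvBStep grid w c0 c1 dr dc res r).length = h := by
      simp [pvBStep, hlen]
    rw [List.foldl_cons, ih _ (fun x hx => hmem x (List.mem_cons_of_mem _ hx)) hlen']
    obtain ⟨hr0, hrd0, hrdh⟩ := hmem r List.mem_cons_self
    by_cases hC : ((i : Int) - dr) ∈ rs
    · rw [if_pos hC, if_pos (List.mem_cons_of_mem _ hC)]
    · rw [if_neg hC]
      unfold pvBStep
      rw [pvGetCell_setRow]
      by_cases hri : (i : Int) - dr = r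
      · rw [if_pos ⟨by omega, by omega⟩, if_pos (List.mem_cons.mpr (Or.inl hri)), hri]
      · rw [if_neg (by rintro ⟨ha, _⟩; exact hri (by omega)),
          if_neg (by
            intro hmem'
            rcases List.mem_cons.mp hmem' with he | hm
            exacts [hri he, hC hm])]

theorem pvB_loop_eq_target (grid : List (List Int)) (h w : Nat) (dr dc : Int)
    (hh : grid.length = h) (hw : 0 < w)
    (hrows : ∀ row ∈ grid, (w : Int) ≤ (row.length : Int)) :
    (if max 0 (-dc) < min (w : Int) ((w : Int) - dc) then
      (PySem.List.pyRange (max 0 (-dr)) (min (h : Int) ((h : Int) - dr)) 1).foldl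
        (pvBStep grid (w : Int) (max 0 (-dc)) (min (w : Int) ((w : Int) - dc)) dr dc)
        (List.replicate h (List.replicate w (0 : Int)))
    else List.replicate h (List.replicate w (0 : Int))) = pvTarget grid h w dr dc := by
  have hrowlen : ∀ r : Int, 0 ≤ r → r < (h : Int) →
      (min (w : Int) ((w : Int) - dc)) ≤ ((grid.getD r.toNat []).length : Int) := by
    intro r hr0 hrh
    have hmem : grid.getD r.toNat [] ∈ grid := by
      have : r.toNat < grid.length := by omega
      rw [List.getD_eq_getElem _ _ this]
      exact List.getElem_mem this
    have := hrows _ hmem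
    omega
  by_cases hc : max 0 (-dc) < min (w : Int) ((w : Int) - dc)
  · rw [if_pos hc]
    apply pv_eq_target
    · apply pv_foldl_preserve _ _ _ _ _ (pvShape_replicate h w)
      intro a r hrmem ha
      have hrb := (PySem.List.mem_pyRange_one).mp hrmem
      refine ⟨by simp [pvBStep, ha.1], fun row hrow => ?_⟩
      rcases List.mem_or_eq_of_mem_set hrow with hmem | heq
      · exact ha.2 row hmem
      · subst heq
        rw [pvRowB_len _ _ _ _ _ (by omega) (by omega) (by omega) (by omega)
          (hrowlen r (by omega) (by omega))]
        omega
    · intro i j hi hj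
      rw [pvBfold_char grid h (w : Int) (max 0 (-dc)) (min (w : Int) ((w : Int) - dc)) dr dc i j hi _ _
        (fun r hrmem => by
          have := (PySem.List.mem_pyRange_one).mp hrmem
          exact ⟨by omega, by omega, by omega⟩)
        (by simp)]
      rw [pvGetCell_replicate]
      unfold pvF
      by_cases hrowc : ((i : Int) - dr) ∈ PySem.List.pyRange (max 0 (-dr)) (min (h : Int) ((h : Int) - dr)) 1
      · rw [if_pos hrowc]
        have hrb := (PySem.List.mem_pyRange_one).mp hrowc
        rw [pvRowB_getD _ _ _ _ _ _ (by omega) (by omega) (by omega) (by omega)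
          (hrowlen _ (by omega) (by omega)) (by omega)]
        by_cases hcol : max 0 (-dc) + dc ≤ (j : Int) ∧ (j : Int) < min (w : Int) ((w : Int) - dc) + dc
        · rw [if_pos hcol, if_pos ⟨by omega, by omega, by omega, by omega⟩]
          rfl
        · rw [if_neg hcol, if_neg (by rintro ⟨_, _, h3, h4⟩; exact hcol ⟨by omega, by omega⟩)]
      · rw [if_neg hrowc, if_neg (by
          rintro ⟨h1, h2, _, _⟩
          exact hrowc ((PySem.List.mem_pyRange_one).mpr ⟨by omega, by omega⟩))]
  · rw [if_neg hc]
    apply pv_eq_target (pvShape_replicate h w)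
    intro i j hi hj
    rw [pvGetCell_replicate]
    unfold pvF
    rw [if_neg (by rintro ⟨_, _, h3, h4⟩; exact hc (by omega))]

theorem pv_loops_agree (grid : List (List Int)) (h w : Nat) (dr dc : Int)
    (hh : grid.length = h) (hw : 0 < w)
    (hrows : ∀ row ∈ grid, (w : Int) ≤ (row.length : Int)) :
    (List.range h).foldl (pvAOuter grid h w dr dc)
        (List.replicate h (List.replicate w (0 : Int))) =
    (if max 0 (-dc) < min (w : Int) ((w : Int) - dc) then
      (PySem.List.pyRange (max 0 (-dr)) (min (h : Int) ((h : Int) - dr)) 1).foldl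
        (pvBStep grid (w : Int) (max 0 (-dc)) (min (w : Int) ((w : Int) - dc)) dr dc)
        (List.replicate h (List.replicate w (0 : Int)))
    else List.replicate h (List.replicate w (0 : Int))) := by
  rw [pvA_loop_eq_target, pvB_loop_eq_target grid h w dr dc hh hw hrows]

-- ===== VERDICT (by name: the statement is the Claim_ definition above) =====
theorem move_along_diagonal_spec : Claim_equal_move_along_diagonal := by
  intro grid steps direction hdom hpre
  unfold Spec_move_along_diagonal
  cases grid with
  | nil => rfl
  | cons row0 rest =>
    by_cases hw0 : row0.length = 0
    · simp [move_along_diagonal, move_along_diagonal_alt, hw0]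
    · have hw : 0 < row0.length := Nat.pos_of_ne_zero hw0
      by_cases hB1 : direction = "main-down"
      · subst hB1
        have hrows : ∀ row ∈ row0 :: rest, ((row0.length : Int)) ≤ (row.length : Int) := by
          intro row hrow
          exact_mod_cast hpre (by tauto) row hrow
        have hd : (PySem.Dict.ofList [("main-down", (steps, steps)), ("main-up", (-steps, -steps)),
            ("anti-down", (steps, -steps)), ("anti-up", (-steps, steps))]).get? "main-down"
            = some (steps, steps) := rfl
        simp only [move_along_diagonal, move_along_diagonal_alt, if_neg hw0, hd,
          Int.toNat_natCast, String.reduceEq, reduceIte]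
        exact pv_loops_agree (row0 :: rest) (row0 :: rest).length row0.length steps steps rfl hw hrows
      · by_cases hB2 : direction = "main-up"
        · subst hB2
          have hrows : ∀ row ∈ row0 :: rest, ((row0.length : Int)) ≤ (row.length : Int) := by
            intro row hrow
            exact_mod_cast hpre (by tauto) row hrow
          have hd : (PySem.Dict.ofList [("main-down", (steps, steps)), ("main-up", (-steps, -steps)),
              ("anti-down", (steps, -steps)), ("anti-up", (-steps, steps))]).get? "main-up"
              = some ((-steps), (-steps)) := rfl
          simp only [move_along_diagonal, move_along_diagonal_alt, if_neg hw0, hd,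
            Int.toNat_natCast, String.reduceEq, reduceIte]
          exact pv_loops_agree (row0 :: rest) (row0 :: rest).length row0.length (-steps) (-steps) rfl hw hrows
        · by_cases hB3 : direction = "anti-down"
          · subst hB3
            have hrows : ∀ row ∈ row0 :: rest, ((row0.length : Int)) ≤ (row.length : Int) := by
              intro row hrow
              exact_mod_cast hpre (by tauto) row hrow
            have hd : (PySem.Dict.ofList [("main-down", (steps, steps)), ("main-up", (-steps, -steps)),
                ("anti-down", (steps, -steps)), ("anti-up", (-steps, steps))]).get? "anti-down"
                = some (steps, (-steps)) := rfl
            simp only [move_along_diagonal, move_along_diagonal_alt, if_neg hw0, hd,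
              Int.toNat_natCast, String.reduceEq, reduceIte]
            exact pv_loops_agree (row0 :: rest) (row0 :: rest).length row0.length steps (-steps) rfl hw hrows
          · by_cases hB4 : direction = "anti-up"
            · subst hB4
              have hrows : ∀ row ∈ row0 :: rest, ((row0.length : Int)) ≤ (row.length : Int) := by
                intro row hrow
                exact_mod_cast hpre (by tauto) row hrow
              have hd : (PySem.Dict.ofList [("main-down", (steps, steps)), ("main-up", (-steps, -steps)),
                  ("anti-down", (steps, -steps)), ("anti-up", (-steps, steps))]).get? "anti-up"
                  = some ((-steps), steps) := rfl
              simp only [move_along_diagonal, move_along_diagonal_alt, if_neg hw0, hd,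
                Int.toNat_natCast, String.reduceEq, reduceIte]
              exact pv_loops_agree (row0 :: rest) (row0 :: rest).length row0.length (-steps) steps rfl hw hrows
            · have hd : (PySem.Dict.ofList [("main-down", (steps, steps)), ("main-up", (-steps, -steps)),
                  ("anti-down", (steps, -steps)), ("anti-up", (-steps, steps))]).get? direction
                  = none := by
                simp [PySem.Dict.ofList, PySem.Dict.update, PySem.Dict.insert, PySem.Dict.empty,
                  PySem.Dict.get?, Ne.symm hB1, Ne.symm hB2, Ne.symm hB3, Ne.symm hB4]
              simp only [move_along_diagonal, move_along_diagonal_alt, if_neg hw0, hd,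
                if_neg hB1, if_neg hB2, if_neg hB3, if_neg hB4]
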